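-- pv_equiv track=rewrite | github.com/Hima9791/New_ACC | pipelines/fixed_pipeline.py | display_mapping
-- ===== SOURCE A (Python) =====
-- def display_mapping(mapping_dict, desired_order, category, main_key):
--     def get_attribute_from_code(code):
--         suffix = code.split('-', 1)[1] if '-' in code else code
--         if 'V' in suffix:
--             return "Value"
--         elif 'U' in suffix:
--             return "Unit"
--         return "Unknown"
--     output = []
--     used_codes = set()
--     for code in desired_order:
--         if code in mapping_dict:
--             attr = get_attribute_from_code(code)
--             row = {
--                 "Main Key": main_key,
--                 "Category": category,
--                 "Attribute": attr,
--                 "Code": code,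
--                 "Value": mapping_dict[code]["value"]
--             }
--             output.append(row)
--             used_codes.add(code)
--     extras = [c for c in mapping_dict if c not in used_codes]
--     extras.sort()
--     for code in extras:
--         attr = get_attribute_from_code(code)
--         row = {
--             "Main Key": main_key,
--             "Category": category,
--             "Attribute": attr,
--             "Code": code,
--             "Value": mapping_dict[code]["value"]
--         }
--         output.append(row)
--     return output
-- ===== SOURCE B (Python) =====
-- def display_mapping(mapping_dict, desired_order, category, main_key):
--     def get_attribute_from_code(code):
--         suffix = code.split('-', 1)[1] if '-' in code else code
--         if 'V' in suffix:
--             return "Value"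
--         if 'U' in suffix:
--             return "Unit"
--         return "Unknown"
--     # Decorate: each mapping entry gets numeric sort keys -- its positions in
--     # desired_order, or the sentinel len(desired_order) for codes not ordered.
--     sentinel = len(desired_order)
--     positions = {}
--     for i, code in enumerate(desired_order):
--         positions.setdefault(code, []).append(i)
--     keyed = []
--     for code, entry in mapping_dict.items():
--         for p in positions.get(code, [sentinel]):
--             keyed.append((p, code, entry["value"]))
--     # One global sort yields the whole ordering: desired positions first
--     # (distinct p < sentinel), then the leftover codes lexicographically.
--     keyed.sort(key=lambda t: (t[0], t[1]))
--     return [{"Main Key": main_key, "Category": category,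
--              "Attribute": get_attribute_from_code(code),
--              "Code": code, "Value": value}
--             for p, code, value in keyed]
-- ===== Notes on version B (the rewrite author's own statement) =====
-- stated objective: alternative
-- what changed: B is a decorate-sort-undecorate: it tags every mapping entry with numeric position keys (its indices in desired_order, or the sentinel len(desired_order)), performs ONE global sort on (position, code) and builds the rows from the sorted tagged list, instead of A's two-phase construction (filtered pass over desired_order with a used-codes set, then a separate sort-and-append pass over the leftover keys).
-- outside the precondition, e.g. on display_mapping({'a': {}}, [], 'c', 'k'): A raises KeyError, B raises KeyError
import Mathlib
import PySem

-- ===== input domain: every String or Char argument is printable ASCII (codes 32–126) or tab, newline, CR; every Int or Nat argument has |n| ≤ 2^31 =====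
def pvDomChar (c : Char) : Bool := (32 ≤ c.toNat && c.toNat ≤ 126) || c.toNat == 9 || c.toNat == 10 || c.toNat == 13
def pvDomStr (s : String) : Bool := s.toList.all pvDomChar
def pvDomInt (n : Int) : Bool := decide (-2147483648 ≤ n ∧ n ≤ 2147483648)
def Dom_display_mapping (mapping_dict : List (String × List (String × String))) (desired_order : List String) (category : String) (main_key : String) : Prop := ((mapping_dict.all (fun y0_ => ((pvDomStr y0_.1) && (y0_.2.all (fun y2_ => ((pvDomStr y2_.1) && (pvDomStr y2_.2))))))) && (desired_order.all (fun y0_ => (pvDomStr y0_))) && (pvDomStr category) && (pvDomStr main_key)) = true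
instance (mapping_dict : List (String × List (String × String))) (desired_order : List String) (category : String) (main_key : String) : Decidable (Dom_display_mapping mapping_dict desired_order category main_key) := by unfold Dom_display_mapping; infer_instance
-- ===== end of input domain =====

-- B is a decorate-sort-undecorate re-implementation: one global sort on (position, code) keys
-- replaces A's two-phase build (ordered pass with a used-set, then sorted extras); same cost class.


-- ===== PORT A =====
-- get_attribute_from_code (identical inner helper in both Pythons); the split has ≥ 2 parts whenever '-' ∈ code, so List.getD 1 is exact
def pvAttr (code : String) : String :=
  let suffix := if PySem.Str.isIn "-" code then ((PySem.Str.splitMax? code "-" 1).getD []).getD 1 "" else code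
  if PySem.Str.isIn "V" suffix then "Value"
  else if PySem.Str.isIn "U" suffix then "Unit"
  else "Unknown"

-- the row dict A builds; mapping_dict[code]["value"] is PySem.Dict.getD with default "" —
-- exact under Pre_ (the "value" key is present)
def pvRow (mapping_dict : List (String × List (String × String))) (category main_key code : String) : List (String × String) :=
  [("Main Key", main_key), ("Category", category), ("Attribute", pvAttr code), ("Code", code),
   ("Value", PySem.Dict.getD (PySem.Dict.mk ((PySem.Dict.mk mapping_dict).getD code [])) "value" "")]

def display_mapping (mapping_dict : List (String × List (String × String))) (desired_order : List String) (category : String) (main_key : String) : List (List (String × String)) :=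
  let d := PySem.Dict.mk mapping_dict
  -- first loop: output and used_codes accumulated together
  let st := desired_order.foldl
    (fun (acc : List (List (String × String)) × PySem.Set String) code =>
      if d.contains code then
        (acc.1 ++ [pvRow mapping_dict category main_key code], PySem.Set.add acc.2 code)
      else acc)
    ([], PySem.Set.empty)
  let extras := d.keys.filter (fun c => !(PySem.Set.contains st.2 c))
  let extras := PySem.List.sorted extras (fun x => x) false
  -- second loop over the sorted extras
  extras.foldl (fun out code => out ++ [pvRow mapping_dict category main_key code]) st.1

-- ===== PORT B =====
-- B's row built from a tagged triple (position, code, value) — the value travels with the tag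
def pvRowB (category main_key : String) (t : Int × String × String) : List (String × String) :=
  [("Main Key", main_key), ("Category", category), ("Attribute", pvAttr t.2.1), ("Code", t.2.1),
   ("Value", t.2.2)]

def display_mapping_alt (mapping_dict : List (String × List (String × String))) (desired_order : List String) (category : String) (main_key : String) : List (List (String × String)) :=
  let sentinel : Int := desired_order.length
  -- positions: code ↦ list of its indices in desired_order (setdefault(...).append(i))
  let positions := (PySem.List.enumerate desired_order).foldl
    (fun (m : PySem.Dict String (List Int)) q => m.modify q.2 [] (fun l => l ++ [q.1]))
    PySem.Dict.empty
  -- decorate: every mapping entry, tagged with its position keys (or the sentinel)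
  let keyed := (PySem.Dict.mk mapping_dict).items.foldl
    (fun (acc : List (Int × String × String)) it =>
      acc ++ ((positions.get? it.1).getD [sentinel]).map
        (fun p => (p, it.1, PySem.Dict.getD (PySem.Dict.mk it.2) "value" "")))
    []
  -- one global sort on (position, code)
  let keyedSorted := PySem.List.sorted2 keyed (fun t => t.1) (fun t => t.2.1) false
  keyedSorted.map (fun t => pvRowB category main_key t)

-- ===== PRECONDITION & SPEC =====
-- Pre_ excludes (1) mapping entries lacking the inner key "value", on which A raises KeyError, and
-- (2) association lists with duplicate outer keys, which no Python dict can present to A at all.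
def Pre_display_mapping (mapping_dict : List (String × List (String × String))) (desired_order : List String) (category : String) (main_key : String) : Prop :=
  (mapping_dict.map Prod.fst).Nodup ∧
  mapping_dict.all (fun p => (p.2.map Prod.fst).contains "value") = true
instance (mapping_dict : List (String × List (String × String))) (desired_order : List String) (category : String) (main_key : String) : Decidable (Pre_display_mapping mapping_dict desired_order category main_key) := by unfold Pre_display_mapping; infer_instance
def pvWitness_display_mapping : (List (String × List (String × String))) × List String × String × String :=
  ([("A-V", [("value", "3")]), ("B-U", [("value", "7")])], ["B-U", "Z"], "cat", "mk")

def Spec_display_mapping (mapping_dict : List (String × List (String × String))) (desired_order : List String) (category : String) (main_key : String) (out : List (List (String × String))) : Prop := out = display_mapping_alt mapping_dict desired_order category main_key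
instance (mapping_dict : List (String × List (String × String))) (desired_order : List String) (category : String) (main_key : String) (out : List (List (String × String))) : Decidable (Spec_display_mapping mapping_dict desired_order category main_key out) := by unfold Spec_display_mapping; infer_instance

-- ===== CLAIM (what is proved, stated in full; the proofs are below) =====
def Claim_equal_display_mapping : Prop := ∀ (mapping_dict : List (String × List (String × String))) (desired_order : List String) (category : String) (main_key : String), Dom_display_mapping mapping_dict desired_order category main_key → Pre_display_mapping mapping_dict desired_order category main_key → Spec_display_mapping mapping_dict desired_order category main_key (display_mapping mapping_dict desired_order category main_key)

-- ===== LEMMAS AND PROOFS =====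

-- proof-only abbreviations (used below the claim block only)
def pvPresent (mapping_dict : List (String × List (String × String))) (desired_order : List String) : List String :=
  desired_order.filter (fun c => (PySem.Dict.mk mapping_dict).contains c)

def pvExtrasSorted (mapping_dict : List (String × List (String × String))) (desired_order : List String) : List String :=
  PySem.List.sorted ((PySem.Dict.mk mapping_dict).keys.filter
    (fun c => !(PySem.Set.contains (PySem.Set.ofList (pvPresent mapping_dict desired_order)) c))) (fun x => x) false

def pvVal (mapping_dict : List (String × List (String × String))) (c : String) : String :=
  PySem.Dict.getD (PySem.Dict.mk ((PySem.Dict.mk mapping_dict).getD c [])) "value" ""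

def pvT1 (mapping_dict : List (String × List (String × String))) (desired_order : List String) : List (Int × String × String) :=
  ((PySem.List.enumerate desired_order 0).filter (fun q => (PySem.Dict.mk mapping_dict).contains q.2)).map
    (fun q => (q.1, q.2, pvVal mapping_dict q.2))

def pvT2 (mapping_dict : List (String × List (String × String))) (desired_order : List String) : List (Int × String × String) :=
  (pvExtrasSorted mapping_dict desired_order).map (fun c => ((desired_order.length : Int), c, pvVal mapping_dict c))

-- Python's key=lambda t: (t[0], t[1]) comparison is the lexicographic product order
lemma pv_sorted2_eq_sorted_lex {A K1 K2 : Type} [LinearOrder K1] [LinearOrder K2]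
    (xs : List A) (k1 : A → K1) (k2 : A → K2) :
    PySem.List.sorted2 xs k1 k2 false = PySem.List.sorted xs (fun a => toLex (k1 a, k2 a)) false := by
  unfold PySem.List.sorted2 PySem.List.sorted
  simp only [Bool.false_eq_true, if_false]
  congr 1
  funext acc x
  congr 1
  funext a b
  rcases lt_trichotomy (k1 a) (k1 b) with h | h | h
  · simp [h, Prod.Lex.lt_iff]
  · simp [h, Prod.Lex.lt_iff]
  · simp [h, h.asymm, ne_of_gt h, Prod.Lex.lt_iff]

lemma pv_enum_filter_map_snd {A : Type} (p : A → Bool) (xs : List A) (s : Int) :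
    ((PySem.List.enumerate xs s).filter (fun q => p q.2)).map (fun q => q.2) = xs.filter p := by
  induction xs generalizing s with
  | nil => simp [PySem.List.enumerate_nil]
  | cons x t ih =>
    by_cases h : p x <;> simp [PySem.List.enumerate_cons, h, ih]

-- partition-by-distinct-keys permutation
lemma pv_perm_flatMap_filter {A K : Type} [BEq K] [LawfulBEq K] (key : A → K) :
    ∀ (ks : List K) (l : List A), ks.Nodup → (∀ x ∈ l, key x ∈ ks) →
      (ks.flatMap (fun c => l.filter (fun x => key x == c))).Perm l := by
  intro ks
  induction ks with
  | nil =>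
    intro l _ hcov
    have hl : l = [] := by
      cases l with
      | nil => rfl
      | cons a t => exact absurd (hcov a (by simp)) (by simp)
    simp [hl]
  | cons c ks ih =>
    intro l hnd hcov
    simp only [List.flatMap_cons]
    have hrest : ∀ c' ∈ ks, l.filter (fun x => key x == c')
        = (l.filter (fun x => !(key x == c))).filter (fun x => key x == c') := by
      intro c' hc'
      rw [List.filter_filter]
      apply List.filter_congr
      intro x _
      by_cases h : key x == c'
      · have hcmem : c ∉ ks := (List.nodup_cons.mp hnd).1
        have hne : (key x == c) = false := by
          rw [beq_eq_false_iff_ne]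
          rw [beq_iff_eq] at h
          intro hc
          exact hcmem ((hc.symm.trans h) ▸ hc')
        simp [h, hne]
      · simp [h]
    rw [List.flatMap_congr hrest]
    have hcov' : ∀ x ∈ l.filter (fun x => !(key x == c)), key x ∈ ks := by
      intro x hx
      simp only [List.mem_filter, Bool.not_eq_true', beq_eq_false_iff_ne, ne_eq] at hx
      rcases List.mem_cons.mp (hcov x hx.1) with h | h
      · exact absurd h hx.2
      · exact h
    have hp := ih (l.filter (fun x => !(key x == c))) hnd.of_cons hcov'
    exact (List.Perm.append_left _ hp).trans (List.filter_append_perm _ l)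

lemma pv_A_reduce (mapping_dict : List (String × List (String × String))) (desired_order : List String)
    (category main_key : String) :
    display_mapping mapping_dict desired_order category main_key =
      (pvPresent mapping_dict desired_order).map (pvRow mapping_dict category main_key) ++
      (pvExtrasSorted mapping_dict desired_order).map (pvRow mapping_dict category main_key) := by
  unfold display_mapping pvPresent pvExtrasSorted
  dsimp only
  rw [PySem.List.foldl_if_eq_foldl_filter,
      PySem.List.foldl_prod_mk
        (f := fun a c => a ++ [pvRow mapping_dict category main_key c])
        (g := fun s c => PySem.Set.add s c),
      PySem.List.foldl_append_singleton_eq_map,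
      PySem.List.foldl_append_singleton_eq_map]
  simp only [PySem.Set.empty, ← PySem.Set.ofList_eq_foldl, List.nil_append]
  rfl

lemma pv_sorted2_char (xs ys : List (Int × String × String))
    (hperm : ys.Perm xs)
    (hpair : List.Pairwise (fun a b => a.1 < b.1 ∨ (a.1 = b.1 ∧ a.2.1 < b.2.1)) ys) :
    PySem.List.sorted2 xs (fun t => t.1) (fun t => t.2.1) false = ys := by
  rw [pv_sorted2_eq_sorted_lex]
  refine PySem.List.sorted_eq_of_perm_of_pairwise_lt xs ys _ hperm (hpair.imp ?_)
  intro a b h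
  rw [Prod.Lex.lt_iff]
  simpa using h

lemma pv_B_reduce (mapping_dict : List (String × List (String × String))) (desired_order : List String)
    (category main_key : String) (hnodup : (mapping_dict.map Prod.fst).Nodup) :
    display_mapping_alt mapping_dict desired_order category main_key =
      (pvT1 mapping_dict desired_order ++ pvT2 mapping_dict desired_order).map (pvRowB category main_key) := by
  unfold display_mapping_alt
  dsimp only
  rw [PySem.List.foldl_append_eq_flatMap, List.nil_append]
  congr 1
  -- notation
  set E0 := PySem.List.enumerate desired_order with hE0
  set P := List.foldl (fun m q => m.modify q.2 [] fun l => l ++ [q.1]) PySem.Dict.empty E0 with hPdef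
  set N : Int := (desired_order.length : Int) with hNdef
  have hndk : (PySem.Dict.mk mapping_dict).keys.Nodup := by
    simpa [PySem.Dict.keys_mk] using hnodup
  -- facts about the positions dict P
  have hPswap : P = List.foldl (fun m p => m.modify p.1 [] fun l => l ++ [p.2])
      PySem.Dict.empty (E0.map Prod.swap) := by
    rw [List.foldl_map]
    simp only [Prod.fst_swap, Prod.snd_swap]
    exact hPdef
  have hgetD : ∀ c, P.getD c [] = ((E0.filter (fun q => q.2 == c)).map (fun q => q.1)) := by
    intro c
    rw [hPswap, PySem.Dict.getD_foldl_modify_append, List.filter_map, List.map_map]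
    simp [Function.comp_def]
  have hkeysP : P.keys = PySem.Set.ofList desired_order := by
    rw [hPdef, PySem.Dict.keys_foldl_modify_key (key := fun q : Int × String => q.2)]
    simp [PySem.Set.update, PySem.Set.ofList, PySem.List.map_snd_enumerate, hE0]
  have hval : ∀ it ∈ mapping_dict,
      PySem.Dict.getD (PySem.Dict.mk it.2) "value" "" = pvVal mapping_dict it.1 := by
    intro it hit
    unfold pvVal
    rw [PySem.Dict.getD_of_mem_items (d := PySem.Dict.mk mapping_dict) (k := it.1) (v := it.2)
      (by simpa using hit) hndk]
  -- canonical form of the decorated list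
  have hflat : mapping_dict.flatMap
        (fun it => ((P.get? it.1).getD [N]).map
          (fun p => (p, it.1, PySem.Dict.getD (PySem.Dict.mk it.2) "value" "")))
      = mapping_dict.flatMap
        (fun it => if it.1 ∈ desired_order
          then ((E0.filter (fun q => q.2 == it.1)).map (fun q => q.1)).map
                 (fun p => (p, it.1, pvVal mapping_dict it.1))
          else [(N, it.1, pvVal mapping_dict it.1)]) := by
    apply List.flatMap_congr
    intro it hit
    by_cases h : it.1 ∈ desired_order
    · cases hg : P.get? it.1 with
      | none =>
        rw [PySem.Dict.get?_eq_none_iff_not_mem_keys, hkeysP, PySem.Set.mem_ofList] at hg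
        exact absurd h hg
      | some v =>
        have hv : v = P.getD it.1 [] := by simp [PySem.Dict.getD, hg]
        rw [Option.getD_some, if_pos h, hv, hgetD, hval it hit]
    · have hg : P.get? it.1 = none := by
        rw [PySem.Dict.get?_eq_none_iff_not_mem_keys, hkeysP, PySem.Set.mem_ofList]; exact h
      rw [hg, Option.getD_none, if_neg h, hval it hit]
      simp
  rw [hflat]
  -- abbreviations for the permutation argument
  set tr : Int × String → Int × String × String :=
    (fun q => (q.1, q.2, pvVal mapping_dict q.2)) with htr
  set E := E0.filter (fun q => (PySem.Dict.mk mapping_dict).contains q.2) with hE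
  set Pin : String × List (String × String) → Bool :=
    (fun it => decide (it.1 ∈ desired_order)) with hPin
  set G : String × List (String × String) → List (Int × String × String) :=
    (fun it => if it.1 ∈ desired_order
      then ((E0.filter (fun q => q.2 == it.1)).map (fun q => q.1)).map
             (fun p => (p, it.1, pvVal mapping_dict it.1))
      else [(N, it.1, pvVal mapping_dict it.1)]) with hG
  apply pv_sorted2_char
  · -- permutation
    have hsplit : ((mapping_dict.filter Pin).flatMap G
        ++ (mapping_dict.filter (fun it => !Pin it)).flatMap G).Perm (mapping_dict.flatMap G) := by
      rw [← List.flatMap_append]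
      exact List.Perm.flatMap_right G (List.filter_append_perm Pin mapping_dict)
    have hIn : (mapping_dict.filter Pin).flatMap G
        = (((mapping_dict.filter Pin).map Prod.fst).flatMap
            (fun c => E.filter (fun q => q.2 == c))).map tr := by
      rw [List.flatMap_map, List.map_flatMap]
      apply List.flatMap_congr
      intro it hit
      have hmem : it ∈ mapping_dict := (List.mem_filter.mp hit).1
      have hdes : it.1 ∈ desired_order := by
        have h2 := (List.mem_filter.mp hit).2
        rw [hPin] at h2; simpa using h2
      rw [hG]
      dsimp only
      rw [if_pos hdes, List.map_map]
      have hEE : E.filter (fun q => q.2 == it.1) = E0.filter (fun q => q.2 == it.1) := by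
        rw [hE, List.filter_filter]
        apply List.filter_congr
        intro q _
        by_cases hq : q.2 == it.1
        · have hco : (PySem.Dict.mk mapping_dict).contains q.2 = true := by
            rw [show q.2 = it.1 from by simpa using hq]
            have : it.1 ∈ (PySem.Dict.mk mapping_dict).keys := by
              rw [PySem.Dict.keys_mk]
              exact List.mem_map_of_mem hmem
            exact (PySem.Dict.contains_iff_mem_keys _ _).mpr this
          simp [hq, hco]
        · simp [hq]
      rw [← hEE]
      apply List.map_congr_left
      intro q hq
      have hq2 : q.2 = it.1 := by simpa using (List.mem_filter.mp hq).2
      rw [htr]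
      dsimp only
      rw [hq2]
      rfl
    have hT1 : pvT1 mapping_dict desired_order = E.map tr := by
      unfold pvT1; rfl
    have hks : ((mapping_dict.filter Pin).map Prod.fst).Nodup :=
      hnodup.sublist (List.Sublist.map Prod.fst List.filter_sublist)
    have hcov : ∀ q ∈ E, q.2 ∈ (mapping_dict.filter Pin).map Prod.fst := by
      intro q hq
      have hqE0 : q ∈ E0 := (List.mem_filter.mp hq).1
      have hdes : q.2 ∈ desired_order := by
        rw [← PySem.List.map_snd_enumerate desired_order 0]
        exact List.mem_map_of_mem hqE0
      have hco := (List.mem_filter.mp hq).2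
      have hkeys : q.2 ∈ (PySem.Dict.mk mapping_dict).keys :=
        (PySem.Dict.contains_iff_mem_keys _ _).mp hco
      rw [PySem.Dict.keys_mk] at hkeys
      obtain ⟨it, hit, hfst⟩ := List.mem_map.mp hkeys
      refine List.mem_map.mpr ⟨it, List.mem_filter.mpr ⟨hit, ?_⟩, hfst⟩
      rw [hPin]
      simp [hfst ▸ hdes]
    have hpermIn : ((mapping_dict.filter Pin).flatMap G).Perm (pvT1 mapping_dict desired_order) := by
      rw [hIn, hT1]
      exact (pv_perm_flatMap_filter (fun q : Int × String => q.2) _ E hks hcov).map tr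
    have hOutFn : ∀ it ∈ mapping_dict.filter (fun it => !Pin it),
        G it = [(N, it.1, pvVal mapping_dict it.1)] := by
      intro it hit
      have hnd : it.1 ∉ desired_order := by
        have h2 := (List.mem_filter.mp hit).2
        rw [hPin] at h2; simpa using h2
      rw [hG]
      dsimp only
      rw [if_neg hnd]
    have hOut : (mapping_dict.filter (fun it => !Pin it)).flatMap G
        = ((mapping_dict.filter (fun it => !Pin it)).map Prod.fst).map
            (fun c => (N, c, pvVal mapping_dict c)) := by
      rw [List.flatMap_congr hOutFn, List.map_map]
      induction (mapping_dict.filter (fun it => !Pin it)) with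
      | nil => rfl
      | cons x t ih => simpa using ih
    have hextras : (PySem.Dict.mk mapping_dict).keys.filter
        (fun c => !(PySem.Set.contains (PySem.Set.ofList (pvPresent mapping_dict desired_order)) c))
        = (mapping_dict.filter (fun it => !Pin it)).map Prod.fst := by
      rw [PySem.Dict.keys_mk, List.filter_map]
      congr 1
      apply List.filter_congr
      intro it hit
      have hco : (PySem.Dict.mk mapping_dict).contains it.1 = true := by
        have : it.1 ∈ (PySem.Dict.mk mapping_dict).keys := by
          rw [PySem.Dict.keys_mk]; exact List.mem_map_of_mem hit
        exact (PySem.Dict.contains_iff_mem_keys _ _).mpr this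
      have hmemP : it.1 ∈ PySem.Set.ofList (pvPresent mapping_dict desired_order)
          ↔ it.1 ∈ desired_order := by
        rw [PySem.Set.mem_ofList]
        unfold pvPresent
        constructor
        · intro h; exact (List.mem_filter.mp h).1
        · intro h; exact List.mem_filter.mpr ⟨h, hco⟩
      rw [hPin]
      by_cases hd : it.1 ∈ desired_order
      · have hp : it.1 ∈ pvPresent mapping_dict desired_order := by
          unfold pvPresent; exact List.mem_filter.mpr ⟨hd, hco⟩
        simp [PySem.Set.contains, hd, hp]
      · have hnp : it.1 ∉ pvPresent mapping_dict desired_order := by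
          unfold pvPresent; intro hp; exact hd (List.mem_filter.mp hp).1
        simp [PySem.Set.contains, hd, hnp]
    have hT2 : (pvT2 mapping_dict desired_order).Perm
        (((mapping_dict.filter (fun it => !Pin it)).map Prod.fst).map
          (fun c => (N, c, pvVal mapping_dict c))) := by
      unfold pvT2 pvExtrasSorted
      rw [← hNdef, hextras]
      exact (PySem.List.sorted_perm _ _ _).map _
    exact ((hpermIn.symm).append (by rw [hOut]; exact hT2)).trans hsplit
  · -- pairwise
    rw [List.pairwise_append]
    refine ⟨?_, ?_, ?_⟩
    · unfold pvT1
      refine List.Pairwise.map _ (fun a b h => Or.inl h) ?_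
      exact (PySem.List.pairwise_lt_enumerate desired_order 0).filter _
    · unfold pvT2 pvExtrasSorted
      have hsp := PySem.List.sorted_pairwise ((PySem.Dict.mk mapping_dict).keys.filter
        (fun c => !(PySem.Set.contains (PySem.Set.ofList (pvPresent mapping_dict desired_order)) c)))
        (fun x => x)
      have hnd2 : (PySem.List.sorted ((PySem.Dict.mk mapping_dict).keys.filter
          (fun c => !(PySem.Set.contains (PySem.Set.ofList (pvPresent mapping_dict desired_order)) c)))
          (fun x => x) false).Nodup :=
        ((PySem.List.sorted_perm _ _ false).nodup_iff).mpr (hndk.filter _)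
      have hlt := (hsp.and hnd2).imp
        (fun {a b} h => lt_of_le_of_ne h.1 h.2)
      exact List.Pairwise.map _ (fun a b h => Or.inr ⟨rfl, h⟩) hlt
    · intro a ha b hb
      unfold pvT1 at ha
      unfold pvT2 at hb
      obtain ⟨q, hq, rfl⟩ := List.mem_map.mp ha
      obtain ⟨c, hc, rfl⟩ := List.mem_map.mp hb
      left
      dsimp only
      have hqE : q ∈ PySem.List.enumerate desired_order 0 := (List.mem_filter.mp hq).1
      obtain ⟨k, hk, hqeq⟩ := (PySem.List.mem_enumerate_iff _ _ _).mp hqE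
      rw [hqeq]
      dsimp only
      omega



-- ===== VERDICT (by name: the statement is the Claim_ definition above) =====
theorem display_mapping_spec : Claim_equal_display_mapping := by
  intro md des cat mk _hDom hPre
  obtain ⟨hnodup, _hval⟩ := hPre
  unfold Spec_display_mapping
  rw [pv_A_reduce, pv_B_reduce md des cat mk hnodup]
  rw [List.map_append]
  congr 1
  · unfold pvT1
    rw [List.map_map]
    have h1 : ∀ q ∈ (PySem.List.enumerate des 0).filter (fun q => (PySem.Dict.mk md).contains q.2),
        (pvRowB cat mk ∘ fun q => (q.1, q.2, pvVal md q.2)) q = pvRow md cat mk q.2 := by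
      intro q _; rfl
    rw [List.map_congr_left h1]
    have h2 : (fun (q : Int × String) => pvRow md cat mk q.2)
        = (pvRow md cat mk) ∘ (fun (q : Int × String) => q.2) := rfl
    rw [h2, ← List.map_map, pv_enum_filter_map_snd]
    rfl
  · unfold pvT2
    rw [List.map_map]
    rfl
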